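-- pv_equiv track=rewrite | github.com/wyk18703232953/myResearch | codeComplex/data copy/filteredData/python/linear/python_linear_0267.py | generate_tree_edges
-- ===== SOURCE A (Python) =====
-- def generate_tree_edges(n):
--     if n <= 1:
--         return []
--     edges = []
--     for i in range(2, n + 1):
--         parent = (i // 2)
--         if parent < 1:
--             parent = 1
--         edges.append((parent, i))
--     return edges
-- ===== SOURCE B (Python) =====
-- def generate_tree_edges(n):
--     if n <= 1:
--         return []
--     edges = []
--     for p in range(1, n // 2 + 1):
--         left = 2 * p
--         edges.append((p, left))
--         if left + 1 <= n:
--             edges.append((p, left + 1))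
--     return edges
-- ===== Notes on version B (the rewrite author's own statement) =====
-- stated objective: alternative
-- what changed: Iterates over parent nodes 1..n//2 emitting each parent's one or two children directly, instead of iterating over child nodes 2..n and computing each child's parent by division.
import Mathlib
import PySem

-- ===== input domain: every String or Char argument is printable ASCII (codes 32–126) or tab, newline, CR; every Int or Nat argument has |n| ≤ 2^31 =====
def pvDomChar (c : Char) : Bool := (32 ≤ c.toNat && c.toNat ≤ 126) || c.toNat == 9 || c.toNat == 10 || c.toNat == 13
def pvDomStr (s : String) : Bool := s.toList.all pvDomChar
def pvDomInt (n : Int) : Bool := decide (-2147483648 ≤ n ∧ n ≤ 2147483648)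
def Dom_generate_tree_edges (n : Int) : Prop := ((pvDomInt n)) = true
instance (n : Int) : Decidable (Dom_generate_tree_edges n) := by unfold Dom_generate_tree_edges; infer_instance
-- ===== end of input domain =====

-- B iterates over parent nodes 1..n//2 emitting each parent's one or two children directly,
-- instead of iterating over child nodes 2..n and computing each child's parent by division.

-- ===== PORT A =====
def generate_tree_edges (n : Int) : List (Int × Int) :=
  if n ≤ 1 then []
  else
    (PySem.List.pyRange 2 (n + 1) 1).foldl (fun edges i =>
      let parent := PySem.Int.floordiv i 2
      let parent := if parent < 1 then 1 else parent
      edges ++ [(parent, i)]) []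

-- ===== PORT B =====
def generate_tree_edges_alt (n : Int) : List (Int × Int) :=
  if n ≤ 1 then []
  else
    (PySem.List.pyRange 1 (PySem.Int.floordiv n 2 + 1) 1).foldl (fun edges p =>
      let left := 2 * p
      let edges := edges ++ [(p, left)]
      if left + 1 ≤ n then edges ++ [(p, left + 1)] else edges) []

-- ===== PRECONDITION & SPEC =====
def Spec_generate_tree_edges (n : Int) (out : List (Int × Int)) : Prop := out = generate_tree_edges_alt n
instance (n : Int) (out : List (Int × Int)) : Decidable (Spec_generate_tree_edges n out) := by unfold Spec_generate_tree_edges; infer_instance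

-- ===== CLAIM (what is proved, stated in full; the proofs are below) =====
def Claim_equal_generate_tree_edges : Prop := ∀ (n : Int), Dom_generate_tree_edges n → Spec_generate_tree_edges n (generate_tree_edges n)

-- ===== LEMMAS AND PROOFS =====

-- the one-or-two child edges B's loop body appends for parent p
def childPairs (n p : Int) : List (Int × Int) :=
  if 2 * p + 1 ≤ n then [(p, 2 * p), (p, 2 * p + 1)] else [(p, 2 * p)]

lemma altB_eq_flatMap (n : Int) (hn : ¬ n ≤ 1) :
    generate_tree_edges_alt n
      = (PySem.List.pyRange 1 (PySem.Int.floordiv n 2 + 1) 1).flatMap (childPairs n) := by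
  unfold generate_tree_edges_alt
  rw [if_neg hn]
  have hc := PySem.List.foldl_congr_mem (PySem.List.pyRange 1 (PySem.Int.floordiv n 2 + 1) 1)
      (fun edges p =>
        let left := 2 * p
        let edges := edges ++ [(p, left)]
        if left + 1 ≤ n then edges ++ [(p, left + 1)] else edges)
      (fun edges p => edges ++ childPairs n p) []
      (by intro acc p _; simp only [childPairs]; split <;> simp)
  rw [hc, PySem.List.foldl_append_eq_flatMap]
  simp

lemma a_eq_map (n : Int) (hn : ¬ n ≤ 1) :
    generate_tree_edges n
      = (PySem.List.pyRange 2 (n + 1) 1).map (fun i => (PySem.Int.floordiv i 2, i)) := by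
  unfold generate_tree_edges
  rw [if_neg hn]
  have hc := PySem.List.foldl_congr_mem (PySem.List.pyRange 2 (n + 1) 1)
      (fun edges i =>
        let parent := PySem.Int.floordiv i 2
        let parent := if parent < 1 then 1 else parent
        edges ++ [(parent, i)])
      (fun edges i => edges ++ [(PySem.Int.floordiv i 2, i)]) []
      (by
        intro acc i hi
        have h2 : 2 ≤ i := ((PySem.List.mem_pyRange_one).1 hi).1
        have hd : PySem.Int.floordiv i 2 = i / 2 :=
          PySem.Int.floordiv_eq_ediv_of_pos (by omega)
        simp only []
        rw [if_neg (by rw [hd]; omega)])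
  rw [hc, PySem.List.foldl_append_singleton_eq_map]
  simp

lemma flatMap_eq_map (k : Nat) :
    (PySem.List.pyRange 1 (PySem.Int.floordiv ((k : Int) + 2) 2 + 1) 1).flatMap
        (childPairs ((k : Int) + 2))
      = (PySem.List.pyRange 2 (((k : Int) + 2) + 1) 1).map
          (fun i => (PySem.Int.floordiv i 2, i)) := by
  induction k with
  | zero => decide
  | succ k ih =>
    have hdiv : ∀ a : Int, 0 < a → PySem.Int.floordiv a 2 = a / 2 := fun a ha =>
      PySem.Int.floordiv_eq_ediv_of_pos (by omega)
    rcases Nat.even_or_odd k with ⟨j, hj⟩ | ⟨j, hj⟩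
    · subst hj
      push_cast at ih ⊢
      set J : Int := (j : Int) with hJ
      -- n = J+J+2 (even), n+1 = J+J+3: same parents; last parent J+1 gains its second child
      have e1 : PySem.Int.floordiv (J + J + 1 + 2) 2 + 1 = J + 2 := by
        rw [hdiv _ (by omega)]; omega
      have e0 : PySem.Int.floordiv (J + J + 2) 2 + 1 = J + 2 := by
        rw [hdiv _ (by omega)]; omega
      rw [e1]; rw [e0] at ih
      rw [show J + J + 2 + 1 = J + J + 3 by ring] at ih
      have hsplit : PySem.List.pyRange 1 (J + 2) = PySem.List.pyRange 1 (J + 1) ++ [J + 1] := by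
        rw [show J + 2 = (J + 1) + 1 by ring, PySem.List.pyRange_one_succ_right (by omega)]
      have hrhs : PySem.List.pyRange 2 (J + J + 1 + 2 + 1)
          = PySem.List.pyRange 2 (J + J + 3) ++ [J + J + 3] := by
        rw [show J + J + 1 + 2 + 1 = (J + J + 3) + 1 by ring,
           PySem.List.pyRange_one_succ_right (by omega)]
      rw [hsplit, List.flatMap_append, hrhs, List.map_append]
      rw [hsplit, List.flatMap_append] at ih
      have hcongr : (PySem.List.pyRange 1 (J + 1)).flatMap (childPairs (J + J + 1 + 2))
          = (PySem.List.pyRange 1 (J + 1)).flatMap (childPairs (J + J + 2)) := by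
        unfold List.flatMap
        congr 1
        apply List.map_congr_left
        intro p hp
        have hp' := (PySem.List.mem_pyRange_one).1 hp
        unfold childPairs
        rw [if_pos (by omega), if_pos (by omega)]
      rw [hcongr, ← ih, List.append_assoc]
      congr 1
      have hfd : PySem.Int.floordiv (J + J + 3) 2 = J + 1 := by
        rw [hdiv _ (by omega)]; omega
      simp only [List.flatMap_cons, List.flatMap_nil, List.map_cons, List.map_nil,
        List.append_nil, childPairs, if_pos (show 2 * (J+1) + 1 ≤ J + J + 1 + 2 by omega),
        if_neg (show ¬ (2 * (J+1) + 1 ≤ J + J + 2) by omega), hfd]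
      simp only [List.cons_append, List.nil_append, List.cons.injEq, Prod.mk.injEq]
      exact ⟨trivial, ⟨trivial, by ring⟩, trivial⟩
    · subst hj
      push_cast at ih ⊢
      set J : Int := (j : Int) with hJ
      -- n = 2J+3 (odd), n+1 = 2J+4: a new parent J+2 appears with its single child 2J+4
      have e1 : PySem.Int.floordiv (2 * J + 1 + 1 + 2) 2 + 1 = J + 3 := by
        rw [hdiv _ (by omega)]; omega
      have e0 : PySem.Int.floordiv (2 * J + 1 + 2) 2 + 1 = J + 2 := by
        rw [hdiv _ (by omega)]; omega
      rw [e1]; rw [e0] at ih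
      rw [show 2 * J + 1 + 2 + 1 = 2 * J + 4 by ring] at ih
      have hsplit : PySem.List.pyRange 1 (J + 3) = PySem.List.pyRange 1 (J + 2) ++ [J + 2] := by
        rw [show J + 3 = (J + 2) + 1 by ring, PySem.List.pyRange_one_succ_right (by omega)]
      have hrhs : PySem.List.pyRange 2 (2 * J + 1 + 1 + 2 + 1)
          = PySem.List.pyRange 2 (2 * J + 4) ++ [2 * J + 4] := by
        rw [show 2 * J + 1 + 1 + 2 + 1 = (2 * J + 4) + 1 by ring,
           PySem.List.pyRange_one_succ_right (by omega)]
      rw [hsplit, List.flatMap_append, hrhs, List.map_append]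
      have hcongr : (PySem.List.pyRange 1 (J + 2)).flatMap (childPairs (2 * J + 1 + 1 + 2))
          = (PySem.List.pyRange 1 (J + 2)).flatMap (childPairs (2 * J + 1 + 2)) := by
        unfold List.flatMap
        congr 1
        apply List.map_congr_left
        intro p hp
        have hp' := (PySem.List.mem_pyRange_one).1 hp
        unfold childPairs
        by_cases h : 2 * p + 1 ≤ 2 * J + 1 + 2
        · rw [if_pos (by omega), if_pos h]
        · rw [if_neg (by omega), if_neg h]
      rw [hcongr, ← ih]
      congr 1
      have hfd : PySem.Int.floordiv (2 * J + 4) 2 = J + 2 := by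
        rw [hdiv _ (by omega)]; omega
      simp only [List.flatMap_cons, List.flatMap_nil, List.map_cons, List.map_nil,
        List.append_nil, childPairs,
        if_neg (show ¬ (2 * (J + 2) + 1 ≤ 2 * J + 1 + 1 + 2) by omega), hfd]
      trivial

-- ===== VERDICT (by name: the statement is the Claim_ definition above) =====
theorem generate_tree_edges_spec : Claim_equal_generate_tree_edges := by
  intro n _
  unfold Spec_generate_tree_edges
  by_cases hn : n ≤ 1
  · unfold generate_tree_edges generate_tree_edges_alt
    rw [if_pos hn, if_pos hn]
  · rw [a_eq_map n hn, altB_eq_flatMap n hn]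
    obtain ⟨k, hk⟩ : ∃ k : Nat, n = (k : Int) + 2 := ⟨(n - 2).toNat, by omega⟩
    subst hk
    exact (flatMap_eq_map k).symm
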